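-- pv_equiv track=rewrite | github.com/jonathonreilly/toy-physics | scripts/frontier_decoherence_local_entangle.py | setup_two_slit
-- ===== SOURCE A (Python) =====
-- def setup_two_slit(width, height, node_id):
--     """Place barrier at x = width//3, with two slits."""
--     barrier_x = width // 3
--
--     slit_a_y = height // 4
--     slit_b_y = 3 * height // 4
--
--     blocked = set()
--     slit_a = []
--     slit_b = []
--     for y in range(height):
--         nid = node_id.get((barrier_x, y))
--         if nid is None:
--             continue
--         if abs(y - slit_a_y) <= 1:
--             slit_a.append(nid)
--         elif abs(y - slit_b_y) <= 1:
--             slit_b.append(nid)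
--         else:
--             blocked.add(nid)
--
--     sources = [node_id[(0, y)] for y in range(height)]
--     detectors = [node_id[(width - 1, y)] for y in range(height)]
--
--     return sources, detectors, blocked, slit_a, slit_b, barrier_x
-- ===== SOURCE B (Python) =====
-- def setup_two_slit(width, height, node_id):
--     """Place barrier at x = width//3, with two slits.
--
--     Alternative decomposition: the two 3-row slit windows are built directly
--     from small ranges (the b-window excludes rows already claimed by the
--     a-window, preserving the elif precedence), and a separate filter-only
--     pass collects the blocked nodes.
--     """
--     barrier_x = width // 3
--     slit_a_y = height // 4
--     slit_b_y = 3 * height // 4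
--
--     win_a = [y for y in range(slit_a_y - 1, slit_a_y + 2) if 0 <= y < height]
--     win_b = [y for y in range(slit_b_y - 1, slit_b_y + 2)
--              if 0 <= y < height and abs(y - slit_a_y) > 1]
--
--     slit_a = [node_id[(barrier_x, y)] for y in win_a if (barrier_x, y) in node_id]
--     slit_b = [node_id[(barrier_x, y)] for y in win_b if (barrier_x, y) in node_id]
--
--     blocked = set()
--     for y in range(height):
--         if abs(y - slit_a_y) > 1 and abs(y - slit_b_y) > 1:
--             nid = node_id.get((barrier_x, y))
--             if nid is not None:
--                 blocked.add(nid)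
--
--     sources = [node_id[(0, y)] for y in range(height)]
--     detectors = [node_id[(width - 1, y)] for y in range(height)]
--
--     return sources, detectors, blocked, slit_a, slit_b, barrier_x
-- ===== Notes on version B (the rewrite author's own statement) =====
-- stated objective: alternative
-- what changed: A classifies every row in one three-way loop; B constructs the two 3-row slit windows directly from small ranges (the b-window excluding rows in the a-window to keep the elif precedence) and collects blocked nodes in a separate filter-only pass.
import Mathlib
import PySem

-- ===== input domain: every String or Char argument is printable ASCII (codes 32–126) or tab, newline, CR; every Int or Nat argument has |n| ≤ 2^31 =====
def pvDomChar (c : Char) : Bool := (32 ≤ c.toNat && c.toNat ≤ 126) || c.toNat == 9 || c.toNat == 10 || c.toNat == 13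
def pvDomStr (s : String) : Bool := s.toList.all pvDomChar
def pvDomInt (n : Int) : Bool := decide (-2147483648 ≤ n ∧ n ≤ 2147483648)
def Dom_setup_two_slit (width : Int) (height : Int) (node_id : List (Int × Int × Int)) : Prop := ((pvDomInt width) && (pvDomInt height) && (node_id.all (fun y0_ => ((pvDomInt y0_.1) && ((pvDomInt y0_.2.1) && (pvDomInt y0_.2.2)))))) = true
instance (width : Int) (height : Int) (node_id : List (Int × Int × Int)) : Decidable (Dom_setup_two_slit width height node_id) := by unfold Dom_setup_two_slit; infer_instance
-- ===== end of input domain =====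

-- B replaces A's single three-way classification loop by direct construction of the two 3-row slit
-- windows plus a filter-only pass for blocked nodes: an alternative decomposition, same values and cost.

-- ===== PORT A =====
def setup_two_slit (width : Int) (height : Int) (node_id : List (Int × Int × Int)) :
    List Int × List Int × List Int × List Int × List Int × Int :=
  -- node_id is the Python dict {(x, y): nid}, received as an (x, y, nid) list
  let d : PySem.Dict (Int × Int) Int :=
    PySem.Dict.ofList (node_id.map (fun t => ((t.1, t.2.1), t.2.2)))
  let barrier_x := PySem.Int.floordiv width 3
  let slit_a_y := PySem.Int.floordiv height 4
  let slit_b_y := PySem.Int.floordiv (3 * height) 4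
  -- for y in range(height): classify node (barrier_x, y) into slit_a / slit_b / blocked
  let st := (PySem.List.pyRange 0 height 1).foldl
    (fun (st : PySem.Set Int × List Int × List Int) y =>
      match d.get? (barrier_x, y) with
      | none => st
      | some nid =>
        if (y - slit_a_y).natAbs ≤ 1 then (st.1, st.2.1 ++ [nid], st.2.2)
        else if (y - slit_b_y).natAbs ≤ 1 then (st.1, st.2.1, st.2.2 ++ [nid])
        else (PySem.Set.add st.1 nid, st.2.1, st.2.2))
    ((PySem.Set.empty : PySem.Set Int), ([] : List Int), ([] : List Int))
  -- node_id[(0, y)] / node_id[(width-1, y)]: KeyError on a missing key is excluded by Pre_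
  let sources := (PySem.List.pyRange 0 height 1).map (fun y => d.getD (0, y) 0)
  let detectors := (PySem.List.pyRange 0 height 1).map (fun y => d.getD (width - 1, y) 0)
  (sources, detectors, st.1, st.2.1, st.2.2, barrier_x)

-- ===== PORT B =====
def setup_two_slit_alt (width : Int) (height : Int) (node_id : List (Int × Int × Int)) :
    List Int × List Int × List Int × List Int × List Int × Int :=
  let d : PySem.Dict (Int × Int) Int :=
    PySem.Dict.ofList (node_id.map (fun t => ((t.1, t.2.1), t.2.2)))
  let barrier_x := PySem.Int.floordiv width 3
  let slit_a_y := PySem.Int.floordiv height 4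
  let slit_b_y := PySem.Int.floordiv (3 * height) 4
  -- the two 3-row slit windows; win_b drops rows already claimed by win_a (elif precedence)
  let win_a := (PySem.List.pyRange (slit_a_y - 1) (slit_a_y + 2) 1).filter
    (fun y => decide (0 ≤ y) && decide (y < height))
  let win_b := (PySem.List.pyRange (slit_b_y - 1) (slit_b_y + 2) 1).filter
    (fun y => decide (0 ≤ y) && decide (y < height) && decide (1 < (y - slit_a_y).natAbs))
  let slit_a := (win_a.filter (fun y => d.contains (barrier_x, y))).map (fun y => d.getD (barrier_x, y) 0)
  let slit_b := (win_b.filter (fun y => d.contains (barrier_x, y))).map (fun y => d.getD (barrier_x, y) 0)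
  -- filter-only pass: every existing barrier node outside both windows is blocked
  let blocked := (PySem.List.pyRange 0 height 1).foldl
    (fun (s : PySem.Set Int) y =>
      if 1 < (y - slit_a_y).natAbs ∧ 1 < (y - slit_b_y).natAbs then
        match d.get? (barrier_x, y) with
        | none => s
        | some nid => PySem.Set.add s nid
      else s)
    (PySem.Set.empty : PySem.Set Int)
  let sources := (PySem.List.pyRange 0 height 1).map (fun y => d.getD (0, y) 0)
  let detectors := (PySem.List.pyRange 0 height 1).map (fun y => d.getD (width - 1, y) 0)
  (sources, detectors, blocked, slit_a, slit_b, barrier_x)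

-- ===== PRECONDITION & SPEC =====
-- A raises KeyError iff some source (0, y) or detector (width-1, y) key, 0 ≤ y < height, is missing.
def Pre_setup_two_slit (width : Int) (height : Int) (node_id : List (Int × Int × Int)) : Prop :=
  ∀ y ∈ PySem.List.pyRange 0 height 1,
    (PySem.Dict.ofList (node_id.map (fun t => ((t.1, t.2.1), t.2.2)))).contains (0, y) = true ∧
    (PySem.Dict.ofList (node_id.map (fun t => ((t.1, t.2.1), t.2.2)))).contains (width - 1, y) = true
instance (width : Int) (height : Int) (node_id : List (Int × Int × Int)) : Decidable (Pre_setup_two_slit width height node_id) := by unfold Pre_setup_two_slit; infer_instance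
def pvWitness_setup_two_slit : Int × Int × (List (Int × Int × Int)) := (1, 1, [(0, 0, 5)])

def Spec_setup_two_slit (width : Int) (height : Int) (node_id : List (Int × Int × Int)) (out : List Int × List Int × List Int × List Int × List Int × Int) : Prop := out = setup_two_slit_alt width height node_id
instance (width : Int) (height : Int) (node_id : List (Int × Int × Int)) (out : List Int × List Int × List Int × List Int × List Int × Int) : Decidable (Spec_setup_two_slit width height node_id out) := by unfold Spec_setup_two_slit; infer_instance

-- ===== CLAIM (what is proved, stated in full; the proofs are below) =====
def Claim_equal_setup_two_slit : Prop := ∀ (width : Int) (height : Int) (node_id : List (Int × Int × Int)), Dom_setup_two_slit width height node_id → Pre_setup_two_slit width height node_id → Spec_setup_two_slit width height node_id (setup_two_slit width height node_id)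

-- ===== LEMMAS AND PROOFS =====

-- two strictly increasing integer ranges restricted to each other agree (plus any extra predicate)
lemma filter_pyRange_window (a b c e : Int) (p : Int → Bool) :
    (PySem.List.pyRange a b 1).filter (fun y => (decide (c ≤ y) && decide (y < e)) && p y)
    = (PySem.List.pyRange c e 1).filter (fun y => (decide (a ≤ y) && decide (y < b)) && p y) := by
  have hp1 : ((PySem.List.pyRange a b 1).filter (fun y => (decide (c ≤ y) && decide (y < e)) && p y)).Pairwise (· < ·) :=
    (PySem.List.pairwise_lt_pyRange_one a b).filter _
  have hp2 : ((PySem.List.pyRange c e 1).filter (fun y => (decide (a ≤ y) && decide (y < b)) && p y)).Pairwise (· < ·) :=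
    (PySem.List.pairwise_lt_pyRange_one c e).filter _
  refine List.Perm.eq_of_pairwise
    (fun a b _ _ h1 h2 => absurd (lt_trans h1 h2) (lt_irrefl a)) hp1 hp2 ?_
  refine (List.perm_ext_iff_of_nodup (hp1.imp ne_of_lt) (hp2.imp ne_of_lt)).mpr ?_
  intro y
  simp only [List.mem_filter, PySem.List.mem_pyRange_one, Bool.and_eq_true, decide_eq_true_eq]
  tauto

lemma foldA_decomp (d : PySem.Dict (Int × Int) Int) (bx ay by' : Int) (ys : List Int) :
    ∀ (s : PySem.Set Int) (sa sb : List Int),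
    ys.foldl (fun (st : PySem.Set Int × List Int × List Int) y =>
        match d.get? (bx, y) with
        | none => st
        | some nid =>
          if (y - ay).natAbs ≤ 1 then (st.1, st.2.1 ++ [nid], st.2.2)
          else if (y - by').natAbs ≤ 1 then (st.1, st.2.1, st.2.2 ++ [nid])
          else (PySem.Set.add st.1 nid, st.2.1, st.2.2)) (s, sa, sb)
    = (ys.foldl (fun (s : PySem.Set Int) y =>
          if 1 < (y - ay).natAbs ∧ 1 < (y - by').natAbs then
            match d.get? (bx, y) with
            | none => s
            | some nid => PySem.Set.add s nid
          else s) s,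
       sa ++ (ys.filter (fun y => decide ((y - ay).natAbs ≤ 1) && d.contains (bx, y))).map (fun y => d.getD (bx, y) 0),
       sb ++ (ys.filter (fun y => decide (1 < (y - ay).natAbs) && (decide ((y - by').natAbs ≤ 1) && d.contains (bx, y)))).map (fun y => d.getD (bx, y) 0)) := by
  induction ys with
  | nil => intro s sa sb; simp
  | cons y ys ih =>
    intro s sa sb
    simp only [List.foldl_cons, List.filter_cons]
    rcases hget : d.get? (bx, y) with _ | nid
    · have hc : d.contains (bx, y) = false := by
        rw [PySem.Dict.contains_eq_isSome_get?, hget]; rfl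
      by_cases hA : (y - ay).natAbs ≤ 1 <;> by_cases hB : (y - by').natAbs ≤ 1 <;>
        simp [hc, ih, hA, hB]
    · have hc : d.contains (bx, y) = true := by
        rw [PySem.Dict.contains_eq_isSome_get?, hget]; rfl
      have hl : d.getD (bx, y) 0 = nid := by rw [PySem.Dict.getD_eq_get?_getD, hget]; rfl
      by_cases hA : (y - ay).natAbs ≤ 1
      · have h2 : ¬ (1 < (y - ay).natAbs) := by omega
        simp [hc, hl, hA, h2, ih]
      · by_cases hB : (y - by').natAbs ≤ 1
        · have h2 : 1 < (y - ay).natAbs := by omega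
          have h3 : ¬ (1 < (y - by').natAbs) := by omega
          simp [hc, hl, hA, hB, h2, h3, ih]
        · have h2 : 1 < (y - ay).natAbs := by omega
          have h3 : 1 < (y - by').natAbs := by omega
          simp [hget, hc, hl, hA, hB, h2, h3, ih]

lemma slitA_window (d : PySem.Dict (Int × Int) Int) (bx ay h : Int) :
    ((PySem.List.pyRange 0 h 1).filter (fun y => decide ((y - ay).natAbs ≤ 1) && d.contains (bx, y)))
    = ((PySem.List.pyRange (ay - 1) (ay + 2) 1).filter
        (fun y => decide (0 ≤ y) && decide (y < h))).filter (fun y => d.contains (bx, y)) := by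
  rw [List.filter_filter]
  rw [List.filter_congr (q := fun y => (decide (ay - 1 ≤ y) && decide (y < ay + 2)) && d.contains (bx, y))
      (by
        intro y _
        beta_reduce
        cases hc : d.contains (bx, y) <;>
          simp only [Bool.and_true, Bool.true_and, Bool.and_false, Bool.false_and] <;>
          rw [Bool.eq_iff_iff] <;>
          simp only [Bool.and_eq_true, decide_eq_true_eq] <;>
          omega)]
  rw [filter_pyRange_window]
  exact List.filter_congr (by
        intro y _
        beta_reduce
        cases hc : d.contains (bx, y) <;>
          simp only [Bool.and_true, Bool.true_and, Bool.and_false, Bool.false_and] <;>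
          rw [Bool.eq_iff_iff] <;>
          simp only [Bool.and_eq_true, decide_eq_true_eq] <;>
          omega)

lemma slitB_window (d : PySem.Dict (Int × Int) Int) (bx ay by' h : Int) :
    ((PySem.List.pyRange 0 h 1).filter
        (fun y => decide (1 < (y - ay).natAbs) && (decide ((y - by').natAbs ≤ 1) && d.contains (bx, y))))
    = ((PySem.List.pyRange (by' - 1) (by' + 2) 1).filter
        (fun y => decide (0 ≤ y) && decide (y < h) && decide (1 < (y - ay).natAbs))).filter
        (fun y => d.contains (bx, y)) := by
  rw [List.filter_filter]
  rw [List.filter_congr (q := fun y => (decide (by' - 1 ≤ y) && decide (y < by' + 2)) && (decide (1 < (y - ay).natAbs) && d.contains (bx, y)))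
      (by
        intro y _
        beta_reduce
        cases hc : d.contains (bx, y) <;>
          simp only [Bool.and_true, Bool.true_and, Bool.and_false, Bool.false_and] <;>
          rw [Bool.eq_iff_iff] <;>
          simp only [Bool.and_eq_true, decide_eq_true_eq] <;>
          omega)]
  rw [filter_pyRange_window]
  exact List.filter_congr (by
        intro y _
        beta_reduce
        cases hc : d.contains (bx, y) <;>
          simp only [Bool.and_true, Bool.true_and, Bool.and_false, Bool.false_and] <;>
          rw [Bool.eq_iff_iff] <;>
          simp only [Bool.and_eq_true, decide_eq_true_eq] <;>
          omega)

-- ===== VERDICT (by name: the statement is the Claim_ definition above) =====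
theorem setup_two_slit_spec : Claim_equal_setup_two_slit := by
  intro width height node_id _ _
  unfold Spec_setup_two_slit setup_two_slit setup_two_slit_alt
  simp only [foldA_decomp, slitA_window, slitB_window, List.nil_append]
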